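-- pv_equiv track=rewrite | github.com/YangGuo57/COMP-1510-Term-Project | map.py | add_element_school_map
-- ===== SOURCE A (Python) =====
-- def add_element_school_map(game_board):
--     for (x, y), location in game_board.items():
--         if location == "1510":
--             game_board[(x, y)] = 'P'
--             update_surroundings(game_board, x, y, '|', '=', 'P')
--         elif location == "1113":
--             game_board[(x, y)] = 'M'
--             update_surroundings(game_board, x, y, '|', '=', "M")
--         elif location == "1712":
--             game_board[(x, y)] = 'S'
--             update_surroundings(game_board, x, y, '|', '=', "S")
--         elif location == "1537":
--             game_board[(x, y)] = 'W'
--             update_surroundings(game_board, x, y, '|', '=', 'W')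
--
--     return game_board
--
-- def update_surroundings(game_board, x, y, door, wall, location_symbol):
--     for row_offset in range(x - 1, x + 2):
--         for col_offset in range(y - 1, y + 2):
--             if (row_offset, col_offset) in game_board and game_board[(row_offset, col_offset)] != location_symbol:
--                 game_board[(row_offset, col_offset)] = door
--
--     for col_offset in range(y - 1, y + 2):
--         for row_offset in [x - 1, x + 1]:
--             if (row_offset, col_offset) in game_board and game_board[(row_offset, col_offset)] != location_symbol:
--                 game_board[(row_offset, col_offset)] = wall
-- ===== SOURCE B (Python) =====
-- SYMBOLS = {'1510': 'P', '1113': 'M', '1712': 'S', '1537': 'W'}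
--
--
-- def add_element_school_map(game_board):
--     for (x, y) in list(game_board):
--         symbol = SYMBOLS.get(game_board[(x, y)])
--         if symbol is None:
--             continue
--         game_board[(x, y)] = symbol
--         for dx in (-1, 0, 1):
--             for dy in (-1, 0, 1):
--                 if dx == 0 and dy == 0:
--                     continue
--                 pos = (x + dx, y + dy)
--                 if pos in game_board and game_board[pos] != symbol:
--                     game_board[pos] = '=' if dx != 0 else '|'
--     return game_board
-- ===== Notes on version B (the rewrite author's own statement) =====
-- stated objective: simpler
-- what changed: A paints all 8 surrounding cells '|' in a 3x3 double loop and then overwrites the x-1/x+1 rows '=' in a second double loop (and picks the symbol via an elif chain); B keeps the same live iteration over the dict but does one pass over the 8 neighbour offsets, writing '=' or '|' directly depending on the row offset, with the symbol fetched from a lookup table.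
import Mathlib
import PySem

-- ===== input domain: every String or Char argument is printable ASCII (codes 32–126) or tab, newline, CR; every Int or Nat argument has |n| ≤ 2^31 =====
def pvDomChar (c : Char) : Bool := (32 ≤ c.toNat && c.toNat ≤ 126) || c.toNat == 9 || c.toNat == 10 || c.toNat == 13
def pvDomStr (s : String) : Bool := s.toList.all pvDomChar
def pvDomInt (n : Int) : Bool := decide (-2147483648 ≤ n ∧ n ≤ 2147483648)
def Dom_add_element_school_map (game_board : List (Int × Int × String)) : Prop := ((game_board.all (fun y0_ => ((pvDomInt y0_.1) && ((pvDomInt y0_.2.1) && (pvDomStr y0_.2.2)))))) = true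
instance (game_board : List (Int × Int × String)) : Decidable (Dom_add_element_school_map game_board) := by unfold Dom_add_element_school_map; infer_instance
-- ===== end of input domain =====

-- B replaces A's paint-doors-then-overwrite-walls double pass with a single pass over the 8
-- neighbour offsets (and a symbol table instead of the elif chain); simpler, same result.
-- Both Pythons mutate the dict in place and return the same object; the ports are pure
-- functions on the board, so return value and final board state coincide.
-- The board dict[(x,y)] -> str is encoded as a List (Int × Int × String) in insertion order
-- (unique keys in any list coming from a Python dict); pyGetItem/pySetItem are the dict
-- get/set ported by hand on that list: get = first match, set rewrites every matching entry
-- (exact for a Python dict, whose keys are unique; no key is ever added or removed here).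
def pyGetItem (gb : List (Int × Int × String)) (x y : Int) : Option String :=
  (gb.find? (fun e => decide (e.1 = x ∧ e.2.1 = y))).map (fun e => e.2.2)

def pySetItem (gb : List (Int × Int × String)) (x y : Int) (v : String) :
    List (Int × Int × String) :=
  gb.map (fun e => if e.1 = x ∧ e.2.1 = y then (e.1, e.2.1, v) else e)

-- the guarded write `if (x,y) in game_board and game_board[(x,y)] != sym: game_board[(x,y)] = v`
-- that both Pythons perform on each surrounding cell
def writeIfNot (gb : List (Int × Int × String)) (x y : Int) (v sym : String) :
    List (Int × Int × String) :=
  match pyGetItem gb x y with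
  | some w => if w ≠ sym then pySetItem gb x y v else gb
  | none => gb

-- ===== PORT A =====
-- update_surroundings, line for line: two nested range loops painting `door`, then a
-- second double loop overwriting the x-1/x+1 rows with `wall`.
def update_surroundings (game_board : List (Int × Int × String)) (x y : Int)
    (door wall location_symbol : String) : List (Int × Int × String) :=
  let gb1 := (PySem.List.pyRange (x - 1) (x + 2) 1).foldl (fun gb r =>
    (PySem.List.pyRange (y - 1) (y + 2) 1).foldl (fun gb c =>
      writeIfNot gb r c door location_symbol) gb) game_board
  (PySem.List.pyRange (y - 1) (y + 2) 1).foldl (fun gb c =>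
    [x - 1, x + 1].foldl (fun gb r =>
      writeIfNot gb r c wall location_symbol) gb) gb1

-- the for-loop over game_board.items() reads values LIVE while only values mutate, so it is
-- a fold over the (fixed) key sequence re-reading the current value at each step.
def add_element_school_map (game_board : List (Int × Int × String)) :
    List (Int × Int × String) :=
  (game_board.map (fun e => (e.1, e.2.1))).foldl (fun gb k =>
    match pyGetItem gb k.1 k.2 with
    | some location =>
      if location = "1510" then update_surroundings (pySetItem gb k.1 k.2 "P") k.1 k.2 "|" "=" "P"
      else if location = "1113" then update_surroundings (pySetItem gb k.1 k.2 "M") k.1 k.2 "|" "=" "M"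
      else if location = "1712" then update_surroundings (pySetItem gb k.1 k.2 "S") k.1 k.2 "|" "=" "S"
      else if location = "1537" then update_surroundings (pySetItem gb k.1 k.2 "W") k.1 k.2 "|" "=" "W"
      else gb
    | none => gb) game_board

-- ===== PORT B =====
def symbolsTable : List (String × String) :=
  [("1510", "P"), ("1113", "M"), ("1712", "S"), ("1537", "W")]

-- SYMBOLS.get(v): first-match lookup in the literal table
def symbolFor (loc : String) : Option String :=
  (symbolsTable.find? (fun p => p.1 == loc)).map (fun p => p.2)

def add_element_school_map_alt (game_board : List (Int × Int × String)) :
    List (Int × Int × String) :=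
  (game_board.map (fun e => (e.1, e.2.1))).foldl (fun gb k =>
    match (pyGetItem gb k.1 k.2).bind symbolFor with
    | some symbol =>
      let gb1 := pySetItem gb k.1 k.2 symbol
      [(-1 : Int), 0, 1].foldl (fun gb dx =>
        [(-1 : Int), 0, 1].foldl (fun gb dy =>
          if dx = 0 ∧ dy = 0 then gb
          else writeIfNot gb (k.1 + dx) (k.2 + dy) (if dx ≠ 0 then "=" else "|") symbol) gb) gb1
    | none => gb) game_board

-- ===== PRECONDITION & SPEC =====
def Spec_add_element_school_map (game_board : List (Int × Int × String)) (out : List (Int × Int × String)) : Prop := out = add_element_school_map_alt game_board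
instance (game_board : List (Int × Int × String)) (out : List (Int × Int × String)) : Decidable (Spec_add_element_school_map game_board out) := by unfold Spec_add_element_school_map; infer_instance

-- ===== CLAIM (what is proved, stated in full; the proofs are below) =====
def Claim_equal_add_element_school_map : Prop := ∀ (game_board : List (Int × Int × String)), Dom_add_element_school_map game_board → Spec_add_element_school_map game_board (add_element_school_map game_board)

-- ===== LEMMAS AND PROOFS =====

def cellCond (sym : String) (gb : List (Int × Int × String)) (k : Int × Int) : Bool :=
  match pyGetItem gb k.1 k.2 with
  | some w => w != sym
  | none => false

def applyOps (sym : String) (ops : List ((Int × Int) × String))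
    (gb : List (Int × Int × String)) : List (Int × Int × String) :=
  ops.foldl (fun gb o => writeIfNot gb o.1.1 o.1.2 o.2 sym) gb

def opsLast (ops : List ((Int × Int) × String)) (k : Int × Int) : Option String :=
  ops.foldl (fun acc o => if o.1 = k then some o.2 else acc) none

def mapFn (sym : String) (ops : List ((Int × Int) × String))
    (gb : List (Int × Int × String)) (e : Int × Int × String) : Int × Int × String :=
  if cellCond sym gb (e.1, e.2.1) = true then
    (e.1, e.2.1, (opsLast ops (e.1, e.2.1)).getD e.2.2)
  else e

lemma getItem_setItem_self (gb : List (Int × Int × String)) (x y : Int) (v : String) :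
    pyGetItem (pySetItem gb x y v) x y = (pyGetItem gb x y).map (fun _ => v) := by
  induction gb with
  | nil => rfl
  | cons e gb ih =>
    by_cases h : e.1 = x ∧ e.2.1 = y
    · simp only [pySetItem, List.map_cons, if_pos h, pyGetItem]
      rw [List.find?_cons_of_pos (by simp [h.1, h.2]),
        List.find?_cons_of_pos (by simp [h.1, h.2])]
      simp
    · simp only [pySetItem, List.map_cons, if_neg h, pyGetItem]
      rw [List.find?_cons_of_neg (by simpa using h), List.find?_cons_of_neg (by simpa using h)]
      simpa [pyGetItem, pySetItem] using ih

lemma getItem_setItem_ne (gb : List (Int × Int × String)) (x y x' y' : Int) (v : String)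
    (h : ¬(x' = x ∧ y' = y)) :
    pyGetItem (pySetItem gb x y v) x' y' = pyGetItem gb x' y' := by
  induction gb with
  | nil => rfl
  | cons e gb ih =>
    by_cases h1 : e.1 = x ∧ e.2.1 = y
    · have h2 : ¬(e.1 = x' ∧ e.2.1 = y') := by
        rintro ⟨hx, hy⟩; exact h ⟨by omega, by omega⟩
      simp only [pySetItem, List.map_cons, if_pos h1, pyGetItem]
      rw [List.find?_cons_of_neg (by simpa using h2), List.find?_cons_of_neg (by simpa using h2)]
      simpa [pyGetItem, pySetItem] using ih
    · by_cases h2 : e.1 = x' ∧ e.2.1 = y'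
      · simp only [pySetItem, List.map_cons, if_neg h1, pyGetItem]
        rw [List.find?_cons_of_pos (by simp [h2.1, h2.2]),
          List.find?_cons_of_pos (by simp [h2.1, h2.2])]
      · simp only [pySetItem, List.map_cons, if_neg h1, pyGetItem]
        rw [List.find?_cons_of_neg (by simpa using h2), List.find?_cons_of_neg (by simpa using h2)]
        simpa [pyGetItem, pySetItem] using ih

lemma cellCond_writeIfNot (sym v : String) (k k' : Int × Int)
    (gb : List (Int × Int × String)) (hv : v ≠ sym) :
    cellCond sym (writeIfNot gb k.1 k.2 v sym) k' = cellCond sym gb k' := by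
  unfold writeIfNot
  cases hget : pyGetItem gb k.1 k.2 with
  | none => rfl
  | some w =>
    by_cases hw : w ≠ sym
    · simp only [if_pos hw]
      by_cases hk : k'.1 = k.1 ∧ k'.2 = k.2
      · unfold cellCond
        rw [hk.1, hk.2, getItem_setItem_self, hget]
        simp only [Option.map_some]
        rw [bne_iff_ne.mpr hv, bne_iff_ne.mpr hw]
      · unfold cellCond
        rw [getItem_setItem_ne _ _ _ _ _ _ hk]
    · simp [hw]

lemma writeIfNot_map (sym v : String) (k : Int × Int) (gb : List (Int × Int × String)) :
    writeIfNot gb k.1 k.2 v sym =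
      gb.map (fun e =>
        if cellCond sym gb k = true ∧ e.1 = k.1 ∧ e.2.1 = k.2 then (e.1, e.2.1, v) else e) := by
  unfold writeIfNot cellCond
  cases hget : pyGetItem gb k.1 k.2 with
  | none => simp
  | some w =>
    by_cases hw : w ≠ sym
    · simp only [if_pos hw, pySetItem]
      have : (w != sym) = true := by simp [hw]
      simp [this]
    · have : (w != sym) = false := by simp at hw; simp [hw]
      simp [hw, this]

lemma opsLast_foldl_acc (ops : List ((Int × Int) × String)) (k : Int × Int)
    (a : Option String) :
    ops.foldl (fun acc o => if o.1 = k then some o.2 else acc) a =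
      (opsLast ops k).or a := by
  induction ops generalizing a with
  | nil => simp [opsLast]
  | cons o ops ih =>
    simp only [List.foldl_cons]
    rw [ih]
    have hcons : opsLast (o :: ops) k =
        (opsLast ops k).or (if o.1 = k then some o.2 else none) := by
      simpa only [opsLast, List.foldl_cons] using
        ih (if o.1 = k then some o.2 else none)
    rw [hcons]
    by_cases h : o.1 = k <;> cases hl : opsLast ops k <;> simp [h, Option.or]

lemma opsLast_cons (o : (Int × Int) × String) (ops : List ((Int × Int) × String))
    (k : Int × Int) :
    opsLast (o :: ops) k = (opsLast ops k).or (if o.1 = k then some o.2 else none) := by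
  simpa only [opsLast, List.foldl_cons] using
    opsLast_foldl_acc ops k (if o.1 = k then some o.2 else none)

lemma applyOps_eq_map (sym : String) (ops : List ((Int × Int) × String))
    (h : ∀ o ∈ ops, o.2 ≠ sym) (gb : List (Int × Int × String)) :
    applyOps sym ops gb = gb.map (mapFn sym ops gb) := by
  induction ops generalizing gb with
  | nil =>
    have heq : ∀ e, mapFn sym [] gb e = e := by
      intro e
      unfold mapFn opsLast
      split <;> rfl
    simp [applyOps, List.map_congr_left (fun e _ => heq e)]
  | cons o ops ih =>
    obtain ⟨⟨a, b⟩, v⟩ := o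
    have ho : v ≠ sym := h ((a, b), v) (by simp)
    have hops : ∀ o' ∈ ops, o'.2 ≠ sym := fun o' h' => h o' (by simp [h'])
    show applyOps sym ops (writeIfNot gb a b v sym) = _
    have hbridge : writeIfNot gb a b v sym = writeIfNot gb ((a, b) : Int × Int).1 ((a, b) : Int × Int).2 v sym := rfl
    rw [ih hops]
    have hFn : mapFn sym ops (writeIfNot gb a b v sym) = mapFn sym ops gb := by
      funext e
      unfold mapFn
      rw [hbridge, cellCond_writeIfNot _ _ _ _ _ ho]
    rw [hFn, hbridge, writeIfNot_map, List.map_map]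
    refine List.map_congr_left (fun e _ => ?_)
    simp only [Function.comp]
    by_cases hko : e.1 = ((a, b) : Int × Int).1 ∧ e.2.1 = ((a, b) : Int × Int).2
    · obtain ⟨h1, h2⟩ := hko
      simp only at h1 h2
      subst h1; subst h2
      by_cases hcnd : cellCond sym gb (e.1, e.2.1) = true
      · rw [if_pos ⟨hcnd, rfl, rfl⟩]
        show mapFn sym ops gb (e.1, e.2.1, v) = mapFn sym (((e.1, e.2.1), v) :: ops) gb e
        unfold mapFn
        rw [opsLast_cons, if_pos rfl]
        rw [if_pos hcnd, if_pos hcnd]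
        cases opsLast ops (e.1, e.2.1) <;> simp [Option.or]
      · rw [if_neg (by simp [hcnd])]
        unfold mapFn
        rw [opsLast_cons, if_pos rfl, if_neg hcnd, if_neg hcnd]
    · rw [if_neg (by tauto)]
      unfold mapFn
      have hk : ¬ ((a, b) : Int × Int) = (e.1, e.2.1) := by
        simp only [Prod.mk.injEq]; tauto
      rw [opsLast_cons, if_neg hk, Option.or_none]

-- the surrounding-cell writes the two ports perform around a building at (x,y), in order
def opsA (x y : Int) : List ((Int × Int) × String) :=
  [((x-1, y-1), "|"), ((x-1, y), "|"), ((x-1, y+1), "|"),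
   ((x, y-1), "|"), ((x, y), "|"), ((x, y+1), "|"),
   ((x+1, y-1), "|"), ((x+1, y), "|"), ((x+1, y+1), "|"),
   ((x-1, y-1), "="), ((x+1, y-1), "="),
   ((x-1, y), "="), ((x+1, y), "="),
   ((x-1, y+1), "="), ((x+1, y+1), "=")]

def opsB (x y : Int) : List ((Int × Int) × String) :=
  [((x + -1, y + -1), "="), ((x + -1, y + 0), "="), ((x + -1, y + 1), "="),
   ((x + 0, y + -1), "|"), ((x + 0, y + 1), "|"),
   ((x + 1, y + -1), "="), ((x + 1, y + 0), "="), ((x + 1, y + 1), "=")]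

lemma pyRange3 (a : Int) : PySem.List.pyRange (a - 1) (a + 2) 1 = [a - 1, a, a + 1] := by
  rw [PySem.List.pyRange_one_cons (by omega)]
  rw [show a - 1 + 1 = a by ring, PySem.List.pyRange_one_cons (by omega)]
  rw [PySem.List.pyRange_one_cons (by omega)]
  rw [show a + 1 + 1 = a + 2 by ring]
  norm_num [PySem.List.pyRange]

lemma bridgeA (gb : List (Int × Int × String)) (x y : Int) (sym : String) :
    update_surroundings gb x y "|" "=" sym = applyOps sym (opsA x y) gb := by
  unfold update_surroundings
  rw [pyRange3, pyRange3]
  simp only [applyOps, opsA, List.foldl_cons, List.foldl_nil]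

lemma bridgeB (gb : List (Int × Int × String)) (x y : Int) (sym : String) :
    ([(-1 : Int), 0, 1].foldl (fun gb dx =>
        [(-1 : Int), 0, 1].foldl (fun gb dy =>
          if dx = 0 ∧ dy = 0 then gb
          else writeIfNot gb (x + dx) (y + dy) (if dx ≠ 0 then "=" else "|") sym) gb) gb) =
      applyOps sym (opsB x y) gb := by
  simp only [applyOps, opsB, List.foldl_cons, List.foldl_nil]
  norm_num

set_option maxHeartbeats 4000000 in
lemma opsLast_eq (x y : Int) (k1 k2 : Int) (h : ¬(k1 = x ∧ k2 = y)) :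
    opsLast (opsA x y) (k1, k2) = opsLast (opsB x y) (k1, k2) := by
  simp only [opsA, opsB, opsLast, List.foldl_cons, List.foldl_nil, Prod.mk.injEq]
  split_ifs <;> first | rfl | omega

lemma cellCond_center (sym : String) (gb : List (Int × Int × String)) (x y : Int)
    (hc : ∀ w, pyGetItem gb x y = some w → w = sym) : cellCond sym gb (x, y) = false := by
  unfold cellCond
  cases hget : pyGetItem gb x y with
  | none => rfl
  | some w => simp [hc w hget]

lemma surr_eq (gb : List (Int × Int × String)) (x y : Int) (sym : String)
    (hd : "|" ≠ sym) (hw : "=" ≠ sym)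
    (hc : ∀ w, pyGetItem gb x y = some w → w = sym) :
    applyOps sym (opsA x y) gb = applyOps sym (opsB x y) gb := by
  rw [applyOps_eq_map sym (opsA x y)
      (by intro o ho; simp [opsA] at ho
          rcases ho with h|h|h|h|h|h|h|h|h|h|h|h|h|h|h <;> rw [h] <;> first | exact hd | exact hw) gb,
    applyOps_eq_map sym (opsB x y)
      (by intro o ho; simp [opsB] at ho
          rcases ho with h|h|h|h|h|h|h|h <;> rw [h] <;> first | exact hd | exact hw) gb]
  refine List.map_congr_left (fun e _ => ?_)
  unfold mapFn
  by_cases hcen : e.1 = x ∧ e.2.1 = y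
  · have hcc : cellCond sym gb (e.1, e.2.1) = false := by
      rw [hcen.1, hcen.2]; exact cellCond_center sym gb x y hc
    simp [hcc]
  · rw [opsLast_eq x y e.1 e.2.1 hcen]

-- the loop bodies of the two ports, named so the outer folds can be compared step by step
def stepA (gb : List (Int × Int × String)) (k : Int × Int) : List (Int × Int × String) :=
  match pyGetItem gb k.1 k.2 with
  | some location =>
    if location = "1510" then update_surroundings (pySetItem gb k.1 k.2 "P") k.1 k.2 "|" "=" "P"
    else if location = "1113" then update_surroundings (pySetItem gb k.1 k.2 "M") k.1 k.2 "|" "=" "M"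
    else if location = "1712" then update_surroundings (pySetItem gb k.1 k.2 "S") k.1 k.2 "|" "=" "S"
    else if location = "1537" then update_surroundings (pySetItem gb k.1 k.2 "W") k.1 k.2 "|" "=" "W"
    else gb
  | none => gb

def stepB (gb : List (Int × Int × String)) (k : Int × Int) : List (Int × Int × String) :=
  match (pyGetItem gb k.1 k.2).bind symbolFor with
  | some symbol =>
    let gb1 := pySetItem gb k.1 k.2 symbol
    [(-1 : Int), 0, 1].foldl (fun gb dx =>
      [(-1 : Int), 0, 1].foldl (fun gb dy =>
        if dx = 0 ∧ dy = 0 then gb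
        else writeIfNot gb (k.1 + dx) (k.2 + dy) (if dx ≠ 0 then "=" else "|") symbol) gb) gb1
  | none => gb

lemma symbolFor_other (loc : String) (e1 : loc ≠ "1510") (e2 : loc ≠ "1113")
    (e3 : loc ≠ "1712") (e4 : loc ≠ "1537") : symbolFor loc = none := by
  simp [symbolFor, symbolsTable, beq_iff_eq,
    Ne.symm e1, Ne.symm e2, Ne.symm e3, Ne.symm e4]

lemma step_eq (gb : List (Int × Int × String)) (k : Int × Int) : stepA gb k = stepB gb k := by
  cases hget : pyGetItem gb k.1 k.2 with
  | none => unfold stepA stepB; rw [hget]; rfl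
  | some loc =>
    have hc : ∀ sym w, pyGetItem (pySetItem gb k.1 k.2 sym) k.1 k.2 = some w → w = sym := by
      intro sym w hw
      rw [getItem_setItem_self, hget] at hw
      exact (Option.some.inj hw).symm
    by_cases e1 : loc = "1510"
    · subst e1
      have h1 : stepA gb k = update_surroundings (pySetItem gb k.1 k.2 "P") k.1 k.2 "|" "=" "P" := by
        unfold stepA; rw [hget]; simp
      have h2 : stepB gb k = applyOps "P" (opsB k.1 k.2) (pySetItem gb k.1 k.2 "P") := by
        unfold stepB; rw [hget]
        exact bridgeB (pySetItem gb k.1 k.2 "P") k.1 k.2 "P"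
      rw [h1, h2, bridgeA]
      exact surr_eq _ _ _ _ (by decide) (by decide) (hc "P")
    · by_cases e2 : loc = "1113"
      · subst e2
        have h1 : stepA gb k = update_surroundings (pySetItem gb k.1 k.2 "M") k.1 k.2 "|" "=" "M" := by
          unfold stepA; rw [hget]; simp
        have h2 : stepB gb k = applyOps "M" (opsB k.1 k.2) (pySetItem gb k.1 k.2 "M") := by
          unfold stepB; rw [hget]
          exact bridgeB (pySetItem gb k.1 k.2 "M") k.1 k.2 "M"
        rw [h1, h2, bridgeA]
        exact surr_eq _ _ _ _ (by decide) (by decide) (hc "M")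
      · by_cases e3 : loc = "1712"
        · subst e3
          have h1 : stepA gb k = update_surroundings (pySetItem gb k.1 k.2 "S") k.1 k.2 "|" "=" "S" := by
            unfold stepA; rw [hget]; simp
          have h2 : stepB gb k = applyOps "S" (opsB k.1 k.2) (pySetItem gb k.1 k.2 "S") := by
            unfold stepB; rw [hget]
            exact bridgeB (pySetItem gb k.1 k.2 "S") k.1 k.2 "S"
          rw [h1, h2, bridgeA]
          exact surr_eq _ _ _ _ (by decide) (by decide) (hc "S")
        · by_cases e4 : loc = "1537"
          · subst e4
            have h1 : stepA gb k = update_surroundings (pySetItem gb k.1 k.2 "W") k.1 k.2 "|" "=" "W" := by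
              unfold stepA; rw [hget]; simp
            have h2 : stepB gb k = applyOps "W" (opsB k.1 k.2) (pySetItem gb k.1 k.2 "W") := by
              unfold stepB; rw [hget]
              exact bridgeB (pySetItem gb k.1 k.2 "W") k.1 k.2 "W"
            rw [h1, h2, bridgeA]
            exact surr_eq _ _ _ _ (by decide) (by decide) (hc "W")
          · have h1 : stepA gb k = gb := by
              unfold stepA; rw [hget]; simp [e1, e2, e3, e4]
            have h2 : stepB gb k = gb := by
              unfold stepB; rw [hget]
              have hnone : (Option.some loc).bind symbolFor = none := by
                simp [symbolFor_other loc e1 e2 e3 e4]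
              rw [hnone]
            rw [h1, h2]

lemma foldl_step (ks : List (Int × Int)) :
    ∀ gb, List.foldl stepA gb ks = List.foldl stepB gb ks := by
  induction ks with
  | nil => intro gb; rfl
  | cons k ks ih =>
    intro gb
    simp only [List.foldl_cons]
    rw [step_eq, ih]

-- ===== VERDICT (by name: the statement is the Claim_ definition above) =====
theorem add_element_school_map_spec : Claim_equal_add_element_school_map := by
  intro gb _
  unfold Spec_add_element_school_map
  show List.foldl stepA gb (gb.map (fun e => (e.1, e.2.1))) =
    List.foldl stepB gb (gb.map (fun e => (e.1, e.2.1)))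
  exact foldl_step _ gb
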